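-- pv_equiv track=rewrite | github.com/itsjay63/Competitive-Programming-Practice | Leetcode/1450. Number of Students Doing Homework at a Given Time.py | busyStudent
-- ===== SOURCE A (Python) =====
-- from typing import List
--
-- def busyStudent(startTime: List[int], endTime: List[int], queryTime: int) -> int:
--     sum = 0
--     l = len(startTime)
--     for i in range(0,l):
--         a = []
--         for j in range(startTime[i],endTime[i]+1):
--             a.append(j)
--         if(queryTime in a):
--             sum = sum + 1
--     return sum
-- ===== SOURCE B (Python) =====
-- def busyStudent(startTime, endTime, queryTime):
--     # One pass over the paired lists with a direct comparison; no per-interval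
--     # range list is ever materialized (A builds range(start, end+1) and does a
--     # membership scan for every interval).
--     return sum(1 for s, e in zip(startTime, endTime) if s <= queryTime <= e)
-- ===== Notes on version B (the rewrite author's own statement) =====
-- stated objective: faster
-- what changed: B replaces A's inner pass (materializing the full list range(start,end+1) per interval and membership-scanning it) with a single zip pass doing one O(1) comparison per interval.
import Mathlib
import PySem

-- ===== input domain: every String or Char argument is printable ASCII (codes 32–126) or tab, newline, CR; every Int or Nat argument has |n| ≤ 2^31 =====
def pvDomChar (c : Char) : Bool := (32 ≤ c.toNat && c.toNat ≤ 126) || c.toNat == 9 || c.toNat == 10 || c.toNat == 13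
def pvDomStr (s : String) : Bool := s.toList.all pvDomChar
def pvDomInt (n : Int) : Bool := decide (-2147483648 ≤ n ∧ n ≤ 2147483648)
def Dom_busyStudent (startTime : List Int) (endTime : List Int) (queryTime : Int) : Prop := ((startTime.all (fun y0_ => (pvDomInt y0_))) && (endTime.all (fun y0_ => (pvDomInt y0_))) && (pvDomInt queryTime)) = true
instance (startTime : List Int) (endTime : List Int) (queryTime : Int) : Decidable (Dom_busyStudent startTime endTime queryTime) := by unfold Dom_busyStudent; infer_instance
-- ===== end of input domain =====

-- B replaces A's materialized per-interval range list + membership scan by one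
-- zip pass with a direct comparison per interval (return value equivalence).

-- ===== PORT A =====
def busyStudent (startTime : List Int) (endTime : List Int) (queryTime : Int) : Int :=
  -- sum = 0; for i in range(0, len(startTime)): a = list(range(startTime[i], endTime[i]+1));
  -- if queryTime in a: sum += 1; return sum
  (PySem.List.pyRange 0 (startTime.length : Int) 1).foldl
    (fun sum i =>
      let a := PySem.List.pyRange (PySem.List.pyGetD startTime i 0)
                 (PySem.List.pyGetD endTime i 0 + 1) 1
      if queryTime ∈ a then sum + 1 else sum) 0

-- ===== PORT B =====
def busyStudent_alt (startTime : List Int) (endTime : List Int) (queryTime : Int) : Int :=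
  -- sum(1 for s, e in zip(startTime, endTime) if s <= queryTime <= e)
  (startTime.zip endTime).foldl
    (fun c p => if p.1 ≤ queryTime ∧ queryTime ≤ p.2 then c + 1 else c) 0

-- ===== PRECONDITION & SPEC =====
-- A indexes endTime[i] for every i < len(startTime): it raises IndexError when
-- endTime is shorter than startTime; exactly those inputs are excluded.
def Pre_busyStudent (startTime : List Int) (endTime : List Int) (queryTime : Int) : Prop :=
  startTime.length ≤ endTime.length
instance (startTime : List Int) (endTime : List Int) (queryTime : Int) : Decidable (Pre_busyStudent startTime endTime queryTime) := by unfold Pre_busyStudent; infer_instance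
def pvWitness_busyStudent : List Int × List Int × Int := ([1, 2, 3], [3, 2, 7], 4)

def Spec_busyStudent (startTime : List Int) (endTime : List Int) (queryTime : Int) (out : Int) : Prop := out = busyStudent_alt startTime endTime queryTime
instance (startTime : List Int) (endTime : List Int) (queryTime : Int) (out : Int) : Decidable (Spec_busyStudent startTime endTime queryTime out) := by unfold Spec_busyStudent; infer_instance

-- ===== CLAIM (what is proved, stated in full; the proofs are below) =====
def Claim_equal_busyStudent : Prop := ∀ (startTime : List Int) (endTime : List Int) (queryTime : Int), Dom_busyStudent startTime endTime queryTime → Pre_busyStudent startTime endTime queryTime → Spec_busyStudent startTime endTime queryTime (busyStudent startTime endTime queryTime)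
-- ===== LEMMAS AND PROOFS =====

-- Counting over Nat indices (with getD) equals counting over the zipped pairs.
lemma count_aux (q : Int) : ∀ (s e : List Int) (acc : Int), s.length ≤ e.length →
    (List.range s.length).foldl
      (fun sum k => if s.getD k 0 ≤ q ∧ q ≤ e.getD k 0 then sum + 1 else sum) acc
    = (s.zip e).foldl (fun c p => if p.1 ≤ q ∧ q ≤ p.2 then c + 1 else c) acc := by
  intro s
  induction s with
  | nil => intro e acc _; simp
  | cons x s' ih =>
    intro e acc h
    cases e with
    | nil => simp at h
    | cons y e' =>
      simp only [List.length_cons, List.range_succ_eq_map, List.foldl_cons,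
        List.foldl_map, List.getD_cons_zero, List.getD_cons_succ, List.zip_cons_cons]
      exact ih e' _ (by simpa using h)

lemma busyStudent_eq (s e : List Int) (q : Int) (hpre : s.length ≤ e.length) :
    busyStudent s e q = busyStudent_alt s e q := by
  unfold busyStudent busyStudent_alt
  rw [PySem.List.pyRange_one]
  simp only [List.foldl_map, PySem.List.mem_pyRange_one, Int.lt_add_one_iff]
  have : ∀ (k : Nat) (sum : Int),
      (if PySem.List.pyGetD s ((0:Int) + k) 0 ≤ q ∧ q ≤ PySem.List.pyGetD e ((0:Int) + k) 0 then sum + 1 else sum)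
      = (if s.getD k 0 ≤ q ∧ q ≤ e.getD k 0 then sum + 1 else sum) := by
    intro k sum
    simp [PySem.List.pyGetD_natCast]
  rw [show ((s.length : Int) - 0).toNat = s.length by omega]
  simp only [this]
  exact count_aux q s e 0 hpre
-- ===== VERDICT (by name: the statement is the Claim_ definition above) =====
theorem busyStudent_spec : Claim_equal_busyStudent :=
  fun s e q _ hpre => busyStudent_eq s e q hpre
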